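-- pv_equiv track=rewrite | github.com/Joon/adventOfCode_2023 | day16/day16.py | get_energy_map
-- ===== SOURCE A (Python) =====
-- def get_energy_map(segments, world):
--     energised_map = set([])
--
--     for segment in segments:
--         energised_map.add((segment[0], segment[1]))
--         move_x = 0
--         move_y = 0
--         match segment[2]:
--             case '>':
--                 move_x = 1
--             case '<':
--                 move_x = -1
--             case 'v':
--                 move_y = 1
--             case '^':
--                 move_y = -1
--             case '_':
--                 raise ValueError('Unknown direction indicator')
--         current_point = (segment[0], segment[1])
--         # Keep on moving until we hit a control point that applies
--         while current_point[0] >= 0 and current_point[0] < len(world[0]) and current_point[1] >= 0 and current_point[1] < len(world):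
--             current_point = (current_point[0] + move_x, current_point[1] + move_y)
--
--             # Hit a control point - get out
--             if len([s for s in segments if s[0] == current_point[0] and s[1] == current_point[1]]) > 0:
--                 break
--             if current_point[0] >= 0 and current_point[0] < len(world[0]) and current_point[1] >= 0 and current_point[1] < len(world):
--                 # Mark a non-control point as energised
--                 energised_map.add(current_point)
--     return energised_map
-- ===== SOURCE B (Python) =====
-- def get_energy_map(segments, world):
--     # Row/column index of control points, then a range fill per segment to the
--     # nearest control point strictly ahead (or the boundary) instead of a step loop.
--     h = len(world)
--     row_xs = {}  # y -> set of x's of control points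
--     col_ys = {}  # x -> set of y's of control points
--     for s in segments:
--         row_xs.setdefault(s[1], set()).add(s[0])
--         col_ys.setdefault(s[0], set()).add(s[1])
--     energised = set()
--     for x, y, d in segments:
--         energised.add((x, y))
--         if d == '_':
--             raise ValueError('Unknown direction indicator')
--         w = len(world[0])
--         if not (0 <= x < w and 0 <= y < h):
--             continue
--         if d == '>':
--             ahead = [cx for cx in row_xs.get(y, ()) if cx > x]
--             stop = min(min(ahead), w) if ahead else w
--             for cx in range(x + 1, stop):
--                 energised.add((cx, y))
--         elif d == '<':
--             ahead = [cx for cx in row_xs.get(y, ()) if cx < x]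
--             stop = max(max(ahead), -1) if ahead else -1
--             for cx in range(x - 1, stop, -1):
--                 energised.add((cx, y))
--         elif d == 'v':
--             ahead = [cy for cy in col_ys.get(x, ()) if cy > y]
--             stop = min(min(ahead), h) if ahead else h
--             for cy in range(y + 1, stop):
--                 energised.add((x, cy))
--         elif d == '^':
--             ahead = [cy for cy in col_ys.get(x, ()) if cy < y]
--             stop = max(max(ahead), -1) if ahead else -1
--             for cy in range(y - 1, stop, -1):
--                 energised.add((x, cy))
--     return energised
-- ===== Notes on version B (the rewrite author's own statement) =====
-- stated objective: alternative
-- what changed: Instead of walking cell by cell and re-scanning the whole segment list at every step, B builds a row/column index of control-point coordinates once and, per segment, finds the nearest control point strictly ahead with min/max over the index and marks the ray with a single range fill.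
-- outside the precondition, e.g. on get_energy_map([(-1, 0, '>')], []): A returns {(-1, 0)}, B raises IndexError
import Mathlib
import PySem

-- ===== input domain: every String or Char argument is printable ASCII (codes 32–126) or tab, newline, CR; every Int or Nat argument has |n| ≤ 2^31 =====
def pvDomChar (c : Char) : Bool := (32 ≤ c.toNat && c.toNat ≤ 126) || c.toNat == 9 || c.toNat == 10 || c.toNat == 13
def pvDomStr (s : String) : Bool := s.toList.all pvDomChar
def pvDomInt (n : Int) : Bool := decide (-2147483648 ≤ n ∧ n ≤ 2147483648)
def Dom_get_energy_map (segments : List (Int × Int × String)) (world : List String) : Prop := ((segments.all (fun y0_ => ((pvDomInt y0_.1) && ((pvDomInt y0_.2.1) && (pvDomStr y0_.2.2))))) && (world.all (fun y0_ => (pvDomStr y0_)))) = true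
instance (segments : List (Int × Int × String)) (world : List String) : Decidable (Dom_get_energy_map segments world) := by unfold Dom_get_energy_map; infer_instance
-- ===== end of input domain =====

-- B replaces A's cell-by-cell walk (with a full scan of `segments` at every step) by a
-- row/column index of control points and one range fill per segment to the nearest control
-- point ahead; return value only (neither program mutates its arguments).

-- ===== PORT A =====
-- in-bounds test of A's while condition
def gemInb (w h : Int) (p : Int × Int) : Bool :=
  decide (0 ≤ p.1) && decide (p.1 < w) && decide (0 ≤ p.2) && decide (p.2 < h)

-- `len([s for s in segments if s[0] == c[0] and s[1] == c[1]]) > 0`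
def gemCtrl (segments : List (Int × Int × String)) (p : Int × Int) : Bool :=
  decide (0 < (segments.filter (fun s => s.1 == p.1 && s.2.1 == p.2)).length)

-- A's while loop; fuel bounds the iteration count (the walk leaves the w×h box after at
-- most w+h steps, so the fuel passed below is never exhausted)
def gemLoop (segments : List (Int × Int × String)) (w h : Int) (mv : Int × Int) :
    Nat → Int × Int → List (Int × Int) → List (Int × Int)
  | 0, _, em => em
  | fuel+1, cur, em =>
    if gemInb w h cur then
      let c : Int × Int := (cur.1 + mv.1, cur.2 + mv.2)
      if gemCtrl segments c then em
      else if gemInb w h c then gemLoop segments w h mv fuel c (PySem.Set.add em c)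
      else gemLoop segments w h mv fuel c em
    else em

-- the '_' direction raises ValueError in Python (excluded by Pre_); like any other
-- unmatched direction the port leaves the move at (0, 0)
def get_energy_map (segments : List (Int × Int × String)) (world : List String) : List (Int × Int) :=
  let w : Int := PySem.Str.len (world.headD "")   -- len(world[0]); world ≠ [] under Pre_ when it is read
  let h : Int := (world.length : Int)
  segments.foldl (fun em seg =>
    let em := PySem.Set.add em (seg.1, seg.2.1)
    let mv : Int × Int :=
      if seg.2.2 == ">" then (1, 0)
      else if seg.2.2 == "<" then (-1, 0)
      else if seg.2.2 == "v" then (0, 1)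
      else if seg.2.2 == "^" then (0, -1)
      else (0, 0)
    gemLoop segments w h mv (w.toNat + h.toNat + 2) (seg.1, seg.2.1) em) PySem.Set.empty

-- ===== PORT B =====
-- one step of B's index-building loop: row_xs / col_ys as dicts of sets
def gemIdxStep (rc : PySem.Dict Int (PySem.Set Int) × PySem.Dict Int (PySem.Set Int))
    (s : Int × Int × String) :
    PySem.Dict Int (PySem.Set Int) × PySem.Dict Int (PySem.Set Int) :=
  (rc.1.insert s.2.1 (PySem.Set.add (rc.1.getD s.2.1 PySem.Set.empty) s.1),
   rc.2.insert s.1 (PySem.Set.add (rc.2.getD s.1 PySem.Set.empty) s.2.1))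

def get_energy_map_alt (segments : List (Int × Int × String)) (world : List String) : List (Int × Int) :=
  let h : Int := (world.length : Int)
  let idx := segments.foldl gemIdxStep (PySem.Dict.empty, PySem.Dict.empty)
  segments.foldl (fun em seg =>
    let x := seg.1
    let y := seg.2.1
    let d := seg.2.2
    let em := PySem.Set.add em (x, y)
    -- '_' raises ValueError in B too (excluded by Pre_); the port just falls through to em
    let w : Int := PySem.Str.len (world.headD "")
    if !(decide (0 ≤ x) && decide (x < w) && decide (0 ≤ y) && decide (y < h)) then em
    else if d == ">" then
      let stop := match PySem.List.min? ((idx.1.getD y PySem.Set.empty).filter (fun cx => decide (x < cx))) (fun v => v) with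
        | some m => min m w
        | none => w
      (PySem.List.pyRange (x+1) stop 1).foldl (fun e cx => PySem.Set.add e (cx, y)) em
    else if d == "<" then
      let stop := match PySem.List.max? ((idx.1.getD y PySem.Set.empty).filter (fun cx => decide (cx < x))) (fun v => v) with
        | some m => max m (-1)
        | none => -1
      (PySem.List.pyRange (x-1) stop (-1)).foldl (fun e cx => PySem.Set.add e (cx, y)) em
    else if d == "v" then
      let stop := match PySem.List.min? ((idx.2.getD x PySem.Set.empty).filter (fun cy => decide (y < cy))) (fun v => v) with
        | some m => min m h
        | none => h
      (PySem.List.pyRange (y+1) stop 1).foldl (fun e cy => PySem.Set.add e (x, cy)) em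
    else if d == "^" then
      let stop := match PySem.List.max? ((idx.2.getD x PySem.Set.empty).filter (fun cy => decide (cy < y))) (fun v => v) with
        | some m => max m (-1)
        | none => -1
      (PySem.List.pyRange (y-1) stop (-1)).foldl (fun e cy => PySem.Set.add e (x, cy)) em
    else em) PySem.Set.empty

-- ===== PRECONDITION & SPEC =====
-- Pre_ excludes (a) any segment with direction '_' (A raises ValueError) and (b) an empty
-- world alongside nonempty segments: there A raises IndexError on world[0] unless every
-- start x is negative (short-circuit), where A returns just the starts while B, reading
-- the width up front, raises IndexError.
def Pre_get_energy_map (segments : List (Int × Int × String)) (world : List String) : Prop :=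
  (segments = [] ∨ world ≠ []) ∧ ∀ s ∈ segments, s.2.2 ≠ "_"
instance (segments : List (Int × Int × String)) (world : List String) : Decidable (Pre_get_energy_map segments world) := by unfold Pre_get_energy_map; infer_instance

def pvWitness_get_energy_map : (List (Int × Int × String)) × List String :=
  ([(0, 1, ">"), (3, 1, "^")], ["....", "....", "...."])

def Spec_get_energy_map (segments : List (Int × Int × String)) (world : List String) (out : List (Int × Int)) : Prop := out = get_energy_map_alt segments world
instance (segments : List (Int × Int × String)) (world : List String) (out : List (Int × Int)) : Decidable (Spec_get_energy_map segments world out) := by unfold Spec_get_energy_map; infer_instance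

-- ===== CLAIM (what is proved, stated in full; the proofs are below) =====
def Claim_equal_get_energy_map : Prop := ∀ (segments : List (Int × Int × String)) (world : List String), Dom_get_energy_map segments world → Pre_get_energy_map segments world → Spec_get_energy_map segments world (get_energy_map segments world)

-- ===== LEMMAS AND PROOFS =====

-- a control point sits at p iff some segment starts there
lemma gemCtrl_iff (segments : List (Int × Int × String)) (p : Int × Int) :
    gemCtrl segments p = true ↔ ∃ s ∈ segments, s.1 = p.1 ∧ s.2.1 = p.2 := by
  simp [gemCtrl, List.length_pos_iff, List.eq_nil_iff_forall_not_mem, List.mem_filter]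

-- row index membership: x appears under key y iff some segment starts at (x, y)
lemma gemIdx_fst_mem (l : List (Int × Int × String))
    (rc : PySem.Dict Int (PySem.Set Int) × PySem.Dict Int (PySem.Set Int)) (y cx : Int) :
    cx ∈ (l.foldl gemIdxStep rc).1.getD y PySem.Set.empty ↔
      cx ∈ rc.1.getD y PySem.Set.empty ∨ ∃ s ∈ l, s.1 = cx ∧ s.2.1 = y := by
  induction l generalizing rc with
  | nil => simp
  | cons s t ih =>
    simp only [List.foldl_cons, ih, List.mem_cons]
    rw [show (gemIdxStep rc s).1 = rc.1.insert s.2.1 (PySem.Set.add (rc.1.getD s.2.1 PySem.Set.empty) s.1) from rfl]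
    rw [PySem.Dict.getD_insert]
    by_cases hy : y = s.2.1 <;> simp [hy, PySem.Set.mem_add] <;> aesop

lemma gemIdx_snd_mem (l : List (Int × Int × String))
    (rc : PySem.Dict Int (PySem.Set Int) × PySem.Dict Int (PySem.Set Int)) (x cy : Int) :
    cy ∈ (l.foldl gemIdxStep rc).2.getD x PySem.Set.empty ↔
      cy ∈ rc.2.getD x PySem.Set.empty ∨ ∃ s ∈ l, s.1 = x ∧ s.2.1 = cy := by
  induction l generalizing rc with
  | nil => simp
  | cons s t ih =>
    simp only [List.foldl_cons, ih, List.mem_cons]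
    rw [show (gemIdxStep rc s).2 = rc.2.insert s.1 (PySem.Set.add (rc.2.getD s.1 PySem.Set.empty) s.2.1) from rfl]
    rw [PySem.Dict.getD_insert]
    by_cases hx : x = s.1 <;> simp [hx, PySem.Set.mem_add] <;> aesop

-- a walk that starts out of bounds adds nothing
lemma gemLoop_stuck (segments : List (Int × Int × String)) (w h : Int) (mv cur : Int × Int)
    (hinb : gemInb w h cur = false) :
    ∀ (fuel : Nat) (em : List (Int × Int)), gemLoop segments w h mv fuel cur em = em := by
  intro fuel em; cases fuel <;> simp [gemLoop, hinb]

-- A's walk to the right = range fill x+1 .. stop-1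
lemma gemLoopRight (segments : List (Int × Int × String)) (w h y stop : Int)
    (hy0 : 0 ≤ y) (hyh : y < h) (hsw : stop ≤ w)
    (hstop : stop < w → gemCtrl segments (stop, y) = true) :
    ∀ (fuel : Nat) (x : Int) (em : List (Int × Int)), 0 ≤ x → x < w → x < stop →
      (∀ t : Int, x < t → t < stop → gemCtrl segments (t, y) = false) →
      (w - x).toNat + 1 ≤ fuel →
      gemLoop segments w h (1, 0) fuel (x, y) em
        = (PySem.List.pyRange (x+1) stop 1).foldl (fun e cx => PySem.Set.add e (cx, y)) em := by
  intro fuel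
  induction fuel with
  | zero => intro x em _ _ _ _ hf; omega
  | succ fuel ih =>
    intro x em hx0 hxw hxs hno hf
    have hinb : gemInb w h (x, y) = true := by
      simp only [gemInb, Bool.and_eq_true, decide_eq_true_eq]; omega
    rw [gemLoop]
    simp only [hinb, if_true, add_zero]
    by_cases hC : gemCtrl segments (x + 1, y) = true
    · have hse : stop = x + 1 := by
        by_contra hne
        have : x + 1 < stop := by omega
        exact absurd hC (by simp [hno (x+1) (by omega) this])
      simp only [hC, if_true, hse, PySem.List.pyRange_one_eq_nil (by omega : x + 1 ≤ x + 1),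
        List.foldl_nil]
    · simp only [Bool.not_eq_true] at hC
      simp only [hC, Bool.false_eq_true, if_false]
      by_cases hlt : x + 1 < stop
      · have hinb' : gemInb w h (x + 1, y) = true := by
          simp only [gemInb, Bool.and_eq_true, decide_eq_true_eq]; omega
        simp only [hinb', if_true]
        rw [ih (x+1) _ (by omega) (by omega) hlt (fun t ht1 ht2 => hno t (by omega) ht2) (by omega)]
        rw [PySem.List.pyRange_one_cons hlt, List.foldl_cons]
      · have hse : stop = x + 1 := by omega
        have hw : w = x + 1 := by
          by_contra hne
          have := hstop (by omega)
          rw [hse] at this; simp [this] at hC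
        have hinb' : gemInb w h (x + 1, y) = false := by
          simp only [gemInb, Bool.and_eq_false_iff, decide_eq_false_iff_not]
          omega
        simp only [hinb', Bool.false_eq_true, if_false]
        rw [gemLoop_stuck segments w h _ _ hinb', hse,
          PySem.List.pyRange_one_eq_nil (by omega : x + 1 ≤ x + 1), List.foldl_nil]

lemma gemLoopLeft (segments : List (Int × Int × String)) (w h y stop : Int)
    (hy0 : 0 ≤ y) (hyh : y < h) (hsw : -1 ≤ stop)
    (hstop : -1 < stop → gemCtrl segments (stop, y) = true) :
    ∀ (fuel : Nat) (x : Int) (em : List (Int × Int)), 0 ≤ x → x < w → stop < x →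
      (∀ t : Int, stop < t → t < x → gemCtrl segments (t, y) = false) →
      (x + 1).toNat + 1 ≤ fuel →
      gemLoop segments w h (-1, 0) fuel (x, y) em
        = (PySem.List.pyRange (x-1) stop (-1)).foldl (fun e cx => PySem.Set.add e (cx, y)) em := by
  intro fuel
  induction fuel with
  | zero => intro x em hx0 _ _ _ hf; omega
  | succ fuel ih =>
    intro x em hx0 hxw hxs hno hf
    have hinb : gemInb w h (x, y) = true := by
      simp only [gemInb, Bool.and_eq_true, decide_eq_true_eq]; omega
    rw [gemLoop]
    simp only [hinb, if_true, add_zero]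
    by_cases hC : gemCtrl segments (x + -1, y) = true
    · have hse : stop = x - 1 := by
        by_contra hne
        have h1 : stop < x - 1 := by omega
        exact absurd hC (by rw [show x + -1 = x - 1 by ring]; simp [hno (x-1) h1 (by omega)])
      simp only [hC, if_true, hse,
        PySem.List.pyRange_neg_one_eq_nil (by omega : x - 1 ≤ x - 1), List.foldl_nil]
    · simp only [Bool.not_eq_true] at hC
      simp only [hC, Bool.false_eq_true, if_false]
      by_cases hlt : stop < x - 1
      · have hinb' : gemInb w h (x + -1, y) = true := by
          simp only [gemInb, Bool.and_eq_true, decide_eq_true_eq]; omega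
        simp only [hinb', if_true]
        rw [show x + -1 = x - 1 by ring]
        rw [ih (x-1) _ (by omega) (by omega) hlt (fun t ht1 ht2 => hno t ht1 (by omega)) (by omega)]
        rw [PySem.List.pyRange_neg_one_cons hlt, List.foldl_cons,
          show x - 1 - 1 = x - 2 by ring]
      · have hse : stop = x - 1 := by omega
        have hx : x = 0 := by
          by_contra hne
          have := hstop (by omega)
          rw [hse, show x - 1 = x + -1 by ring] at this; simp [this] at hC
        have hinb' : gemInb w h (x + -1, y) = false := by
          simp only [gemInb, Bool.and_eq_false_iff, decide_eq_false_iff_not]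
          omega
        simp only [hinb', Bool.false_eq_true, if_false]
        rw [gemLoop_stuck segments w h _ _ hinb', hse,
          PySem.List.pyRange_neg_one_eq_nil (by omega : x - 1 ≤ x - 1), List.foldl_nil]

lemma gemLoopDown (segments : List (Int × Int × String)) (w h x stop : Int)
    (hx0 : 0 ≤ x) (hxw : x < w) (hsh : stop ≤ h)
    (hstop : stop < h → gemCtrl segments (x, stop) = true) :
    ∀ (fuel : Nat) (y : Int) (em : List (Int × Int)), 0 ≤ y → y < h → y < stop →
      (∀ t : Int, y < t → t < stop → gemCtrl segments (x, t) = false) →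
      (h - y).toNat + 1 ≤ fuel →
      gemLoop segments w h (0, 1) fuel (x, y) em
        = (PySem.List.pyRange (y+1) stop 1).foldl (fun e cy => PySem.Set.add e (x, cy)) em := by
  intro fuel
  induction fuel with
  | zero => intro y em _ _ _ _ hf; omega
  | succ fuel ih =>
    intro y em hy0 hyh hys hno hf
    have hinb : gemInb w h (x, y) = true := by
      simp only [gemInb, Bool.and_eq_true, decide_eq_true_eq]; omega
    rw [gemLoop]
    simp only [hinb, if_true, add_zero]
    by_cases hC : gemCtrl segments (x, y + 1) = true
    · have hse : stop = y + 1 := by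
        by_contra hne
        have : y + 1 < stop := by omega
        exact absurd hC (by simp [hno (y+1) (by omega) this])
      simp only [hC, if_true, hse, PySem.List.pyRange_one_eq_nil (by omega : y + 1 ≤ y + 1),
        List.foldl_nil]
    · simp only [Bool.not_eq_true] at hC
      simp only [hC, Bool.false_eq_true, if_false]
      by_cases hlt : y + 1 < stop
      · have hinb' : gemInb w h (x, y + 1) = true := by
          simp only [gemInb, Bool.and_eq_true, decide_eq_true_eq]; omega
        simp only [hinb', if_true]
        rw [ih (y+1) _ (by omega) (by omega) hlt (fun t ht1 ht2 => hno t (by omega) ht2) (by omega)]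
        rw [PySem.List.pyRange_one_cons hlt, List.foldl_cons]
      · have hse : stop = y + 1 := by omega
        have hh : h = y + 1 := by
          by_contra hne
          have := hstop (by omega)
          rw [hse] at this; simp [this] at hC
        have hinb' : gemInb w h (x, y + 1) = false := by
          simp only [gemInb, Bool.and_eq_false_iff, decide_eq_false_iff_not]
          omega
        simp only [hinb', Bool.false_eq_true, if_false]
        rw [gemLoop_stuck segments w h _ _ hinb', hse,
          PySem.List.pyRange_one_eq_nil (by omega : y + 1 ≤ y + 1), List.foldl_nil]

lemma gemLoopUp (segments : List (Int × Int × String)) (w h x stop : Int)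
    (hx0 : 0 ≤ x) (hxw : x < w) (hsh : -1 ≤ stop)
    (hstop : -1 < stop → gemCtrl segments (x, stop) = true) :
    ∀ (fuel : Nat) (y : Int) (em : List (Int × Int)), 0 ≤ y → y < h → stop < y →
      (∀ t : Int, stop < t → t < y → gemCtrl segments (x, t) = false) →
      (y + 1).toNat + 1 ≤ fuel →
      gemLoop segments w h (0, -1) fuel (x, y) em
        = (PySem.List.pyRange (y-1) stop (-1)).foldl (fun e cy => PySem.Set.add e (x, cy)) em := by
  intro fuel
  induction fuel with
  | zero => intro y em hy0 _ _ _ hf; omega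
  | succ fuel ih =>
    intro y em hy0 hyh hys hno hf
    have hinb : gemInb w h (x, y) = true := by
      simp only [gemInb, Bool.and_eq_true, decide_eq_true_eq]; omega
    rw [gemLoop]
    simp only [hinb, if_true, add_zero]
    by_cases hC : gemCtrl segments (x, y + -1) = true
    · have hse : stop = y - 1 := by
        by_contra hne
        have h1 : stop < y - 1 := by omega
        exact absurd hC (by rw [show y + -1 = y - 1 by ring]; simp [hno (y-1) h1 (by omega)])
      simp only [hC, if_true, hse,
        PySem.List.pyRange_neg_one_eq_nil (by omega : y - 1 ≤ y - 1), List.foldl_nil]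
    · simp only [Bool.not_eq_true] at hC
      simp only [hC, Bool.false_eq_true, if_false]
      by_cases hlt : stop < y - 1
      · have hinb' : gemInb w h (x, y + -1) = true := by
          simp only [gemInb, Bool.and_eq_true, decide_eq_true_eq]; omega
        simp only [hinb', if_true]
        rw [show y + -1 = y - 1 by ring]
        rw [ih (y-1) _ (by omega) (by omega) hlt (fun t ht1 ht2 => hno t ht1 (by omega)) (by omega)]
        rw [PySem.List.pyRange_neg_one_cons hlt, List.foldl_cons,
          show y - 1 - 1 = y - 2 by ring]
      · have hse : stop = y - 1 := by omega
        have hy : y = 0 := by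
          by_contra hne
          have := hstop (by omega)
          rw [hse, show y - 1 = y + -1 by ring] at this; simp [this] at hC
        have hinb' : gemInb w h (x, y + -1) = false := by
          simp only [gemInb, Bool.and_eq_false_iff, decide_eq_false_iff_not]
          omega
        simp only [hinb', Bool.false_eq_true, if_false]
        rw [gemLoop_stuck segments w h _ _ hinb', hse,
          PySem.List.pyRange_neg_one_eq_nil (by omega : y - 1 ≤ y - 1), List.foldl_nil]

-- the built row index answers exactly the control-point test of A
lemma gemRow_mem (segments : List (Int × Int × String)) (y cx : Int) :
    (cx ∈ (segments.foldl gemIdxStep (PySem.Dict.empty, PySem.Dict.empty)).1.getD y PySem.Set.empty) ↔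
      gemCtrl segments (cx, y) = true := by
  rw [gemIdx_fst_mem, gemCtrl_iff]; simp [PySem.Dict.empty, PySem.Dict.getD, PySem.Dict.get?, PySem.Set.empty]

lemma gemCol_mem (segments : List (Int × Int × String)) (x cy : Int) :
    (cy ∈ (segments.foldl gemIdxStep (PySem.Dict.empty, PySem.Dict.empty)).2.getD x PySem.Set.empty) ↔
      gemCtrl segments (x, cy) = true := by
  rw [gemIdx_snd_mem, gemCtrl_iff]; simp [PySem.Dict.empty, PySem.Dict.getD, PySem.Dict.get?, PySem.Set.empty]

-- unpacked form of the bounds test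
lemma gemInb_iff (w h x y : Int) :
    gemInb w h (x, y) = true ↔ (0 ≤ x ∧ x < w ∧ 0 ≤ y ∧ y < h) := by
  simp [gemInb, and_assoc]

-- ===== VERDICT (by name: the statement is the Claim_ definition above) =====
theorem get_energy_map_spec : Claim_equal_get_energy_map := by
  intro segments world _ _
  show get_energy_map segments world = get_energy_map_alt segments world
  simp only [get_energy_map, get_energy_map_alt]
  apply PySem.List.foldl_congr_mem'
  intro seg hmem em
  obtain ⟨x, y, d⟩ := seg
  simp only []
  set w : Int := PySem.Str.len (world.headD "") with hw
  set h : Int := (world.length : Int) with hh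
  by_cases hb : 0 ≤ x ∧ x < w ∧ 0 ≤ y ∧ y < h
  · obtain ⟨hx0, hxw, hy0, hyh⟩ := hb
    have hinb : gemInb w h (x, y) = true := (gemInb_iff w h x y).mpr ⟨hx0, hxw, hy0, hyh⟩
    rw [show (decide (0 ≤ x) && decide (x < w) && decide (0 ≤ y) && decide (y < h)) = gemInb w h (x, y) from rfl, hinb]
    simp only [Bool.not_true, Bool.false_eq_true, if_false]
    by_cases hd1 : d = ">"
    · subst hd1
      simp only [beq_self_eq_true, if_true]
      rcases hm : PySem.List.min? (((List.foldl gemIdxStep (PySem.Dict.empty, PySem.Dict.empty) segments).1.getD y PySem.Set.empty).filter (fun cx => decide (x < cx))) (fun v => v) with _ | m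
      · have hempty := (PySem.List.min?_eq_none_iff _ _).mp hm
        have hno : ∀ t : Int, x < t → t < w → gemCtrl segments (t, y) = false := by
          intro t ht _
          rw [Bool.eq_false_iff]
          intro hc
          have htS : t ∈ ((List.foldl gemIdxStep (PySem.Dict.empty, PySem.Dict.empty) segments).1.getD y PySem.Set.empty) := (gemRow_mem segments y t).mpr hc
          have : t ∈ (((List.foldl gemIdxStep (PySem.Dict.empty, PySem.Dict.empty) segments).1.getD y PySem.Set.empty).filter (fun cx => decide (x < cx))) := List.mem_filter.mpr ⟨htS, by simpa using ht⟩
          rw [hempty] at this; exact absurd this (List.not_mem_nil)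
        exact gemLoopRight segments w h y w hy0 hyh le_rfl (fun hlt => absurd hlt (lt_irrefl w)) _ x _ hx0 hxw hxw hno (by omega)
      · have hmemf := PySem.List.min?_mem hm
        have hmin := PySem.List.min?_isMin hm
        obtain ⟨hmS, hxm⟩ := List.mem_filter.mp hmemf
        have hxm : x < m := by simpa using hxm
        have hctrl_m : gemCtrl segments (m, y) = true := (gemRow_mem segments y m).mp hmS
        have hno : ∀ t : Int, x < t → t < min m w → gemCtrl segments (t, y) = false := by
          intro t ht1 ht2
          rw [Bool.eq_false_iff]
          intro hc
          have htS := (gemRow_mem segments y t).mpr hc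
          have := hmin t (List.mem_filter.mpr ⟨htS, by simpa using ht1⟩)
          omega
        refine gemLoopRight segments w h y (min m w) hy0 hyh (min_le_right m w) ?_ _ x _ hx0 hxw (lt_min hxm hxw) hno (by omega)
        intro hlt
        have : min m w = m := min_eq_left (by omega)
        rw [this]; exact hctrl_m
    · by_cases hd2 : d = "<"
      · subst hd2
        simp only [show (("<" : String) == ">") = false from rfl, Bool.false_eq_true, if_false, beq_self_eq_true, if_true]
        rcases hm : PySem.List.max? (((List.foldl gemIdxStep (PySem.Dict.empty, PySem.Dict.empty) segments).1.getD y PySem.Set.empty).filter (fun cx => decide (cx < x))) (fun v => v) with _ | m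
        · have hempty := (PySem.List.max?_eq_none_iff _ _).mp hm
          have hno : ∀ t : Int, (-1 : Int) < t → t < x → gemCtrl segments (t, y) = false := by
            intro t _ ht
            rw [Bool.eq_false_iff]
            intro hc
            have htS := (gemRow_mem segments y t).mpr hc
            have : t ∈ (((List.foldl gemIdxStep (PySem.Dict.empty, PySem.Dict.empty) segments).1.getD y PySem.Set.empty).filter (fun cx => decide (cx < x))) := List.mem_filter.mpr ⟨htS, by simpa using ht⟩
            rw [hempty] at this; exact absurd this (List.not_mem_nil)
          exact gemLoopLeft segments w h y (-1) hy0 hyh le_rfl (fun hlt => absurd hlt (lt_irrefl (-1))) _ x _ hx0 hxw (by omega) hno (by omega)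
        · have hmemf := PySem.List.max?_mem hm
          have hmax := PySem.List.max?_isMax hm
          obtain ⟨hmS, hmx⟩ := List.mem_filter.mp hmemf
          have hmx : m < x := by simpa using hmx
          have hctrl_m : gemCtrl segments (m, y) = true := (gemRow_mem segments y m).mp hmS
          have hno : ∀ t : Int, max m (-1) < t → t < x → gemCtrl segments (t, y) = false := by
            intro t ht1 ht2
            rw [Bool.eq_false_iff]
            intro hc
            have htS := (gemRow_mem segments y t).mpr hc
            have := hmax t (List.mem_filter.mpr ⟨htS, by simpa using ht2⟩)
            omega
          refine gemLoopLeft segments w h y (max m (-1)) hy0 hyh (le_max_right m (-1)) ?_ _ x _ hx0 hxw (by simp only [max_lt_iff]; omega) hno (by omega)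
          intro hlt
          have : max m (-1) = m := max_eq_left (by omega)
          rw [this]; exact hctrl_m
      · by_cases hd3 : d = "v"
        · subst hd3
          simp only [show (("v" : String) == ">") = false from rfl, show (("v" : String) == "<") = false from rfl, Bool.false_eq_true, if_false, beq_self_eq_true, if_true]
          rcases hm : PySem.List.min? (((List.foldl gemIdxStep (PySem.Dict.empty, PySem.Dict.empty) segments).2.getD x PySem.Set.empty).filter (fun cy => decide (y < cy))) (fun v => v) with _ | m
          · have hempty := (PySem.List.min?_eq_none_iff _ _).mp hm
            have hno : ∀ t : Int, y < t → t < h → gemCtrl segments (x, t) = false := by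
              intro t ht _
              rw [Bool.eq_false_iff]
              intro hc
              have htS := (gemCol_mem segments x t).mpr hc
              have : t ∈ (((List.foldl gemIdxStep (PySem.Dict.empty, PySem.Dict.empty) segments).2.getD x PySem.Set.empty).filter (fun cy => decide (y < cy))) := List.mem_filter.mpr ⟨htS, by simpa using ht⟩
              rw [hempty] at this; exact absurd this (List.not_mem_nil)
            exact gemLoopDown segments w h x h hx0 hxw le_rfl (fun hlt => absurd hlt (lt_irrefl h)) _ y _ hy0 hyh hyh hno (by omega)
          · have hmemf := PySem.List.min?_mem hm
            have hmin := PySem.List.min?_isMin hm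
            obtain ⟨hmS, hym⟩ := List.mem_filter.mp hmemf
            have hym : y < m := by simpa using hym
            have hctrl_m : gemCtrl segments (x, m) = true := (gemCol_mem segments x m).mp hmS
            have hno : ∀ t : Int, y < t → t < min m h → gemCtrl segments (x, t) = false := by
              intro t ht1 ht2
              rw [Bool.eq_false_iff]
              intro hc
              have htS := (gemCol_mem segments x t).mpr hc
              have := hmin t (List.mem_filter.mpr ⟨htS, by simpa using ht1⟩)
              omega
            refine gemLoopDown segments w h x (min m h) hx0 hxw (min_le_right m h) ?_ _ y _ hy0 hyh (lt_min hym hyh) hno (by omega)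
            intro hlt
            have : min m h = m := min_eq_left (by omega)
            rw [this]; exact hctrl_m
        · by_cases hd4 : d = "^"
          · subst hd4
            simp only [show (("^" : String) == ">") = false from rfl, show (("^" : String) == "<") = false from rfl, show (("^" : String) == "v") = false from rfl, Bool.false_eq_true, if_false, beq_self_eq_true, if_true]
            rcases hm : PySem.List.max? (((List.foldl gemIdxStep (PySem.Dict.empty, PySem.Dict.empty) segments).2.getD x PySem.Set.empty).filter (fun cy => decide (cy < y))) (fun v => v) with _ | m
            · have hempty := (PySem.List.max?_eq_none_iff _ _).mp hm
              have hno : ∀ t : Int, (-1 : Int) < t → t < y → gemCtrl segments (x, t) = false := by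
                intro t _ ht
                rw [Bool.eq_false_iff]
                intro hc
                have htS := (gemCol_mem segments x t).mpr hc
                have : t ∈ (((List.foldl gemIdxStep (PySem.Dict.empty, PySem.Dict.empty) segments).2.getD x PySem.Set.empty).filter (fun cy => decide (cy < y))) := List.mem_filter.mpr ⟨htS, by simpa using ht⟩
                rw [hempty] at this; exact absurd this (List.not_mem_nil)
              exact gemLoopUp segments w h x (-1) hx0 hxw le_rfl (fun hlt => absurd hlt (lt_irrefl (-1))) _ y _ hy0 hyh (by omega) hno (by omega)
            · have hmemf := PySem.List.max?_mem hm
              have hmax := PySem.List.max?_isMax hm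
              obtain ⟨hmS, hmy⟩ := List.mem_filter.mp hmemf
              have hmy : m < y := by simpa using hmy
              have hctrl_m : gemCtrl segments (x, m) = true := (gemCol_mem segments x m).mp hmS
              have hno : ∀ t : Int, max m (-1) < t → t < y → gemCtrl segments (x, t) = false := by
                intro t ht1 ht2
                rw [Bool.eq_false_iff]
                intro hc
                have htS := (gemCol_mem segments x t).mpr hc
                have := hmax t (List.mem_filter.mpr ⟨htS, by simpa using ht2⟩)
                omega
              refine gemLoopUp segments w h x (max m (-1)) hx0 hxw (le_max_right m (-1)) ?_ _ y _ hy0 hyh (by simp only [max_lt_iff]; omega) hno (by omega)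
              intro hlt
              have : max m (-1) = m := max_eq_left (by omega)
              rw [this]; exact hctrl_m
          · -- unmatched direction: the move is (0, 0); the very first step lands back on the
            -- start, itself a control point, so A adds nothing more — as does B
            have hmv : (if (d == ">") = true then ((1 : Int), (0 : Int)) else if (d == "<") = true then (-1, 0) else if (d == "v") = true then (0, 1) else if (d == "^") = true then (0, -1) else (0, 0)) = ((0 : Int), (0 : Int)) := by
              simp [beq_iff_eq, hd1, hd2, hd3, hd4]
            rw [hmv]
            simp only [beq_iff_eq, hd1, hd2, hd3, hd4, if_false]
            have hctrl : gemCtrl segments (x, y) = true := (gemCtrl_iff segments (x, y)).mpr ⟨(x, y, d), hmem, rfl, rfl⟩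
            rw [show w.toNat + h.toNat + 2 = (w.toNat + h.toNat + 1) + 1 by omega, gemLoop]
            simp only [hinb, if_true, add_zero, hctrl]
  · have hinb : gemInb w h (x, y) = false := Bool.eq_false_iff.mpr (fun hT => hb ((gemInb_iff w h x y).mp hT))
    rw [show (decide (0 ≤ x) && decide (x < w) && decide (0 ≤ y) && decide (y < h)) = gemInb w h (x, y) from rfl, hinb]
    simp only [Bool.not_false, if_true]
    exact gemLoop_stuck segments w h _ _ hinb _ _
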